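/- GENERATED by tools/mkcompositions.py from design/units.gif.tsv (unit `digest_file.COMPOSITION`) — do not edit.
   THE PROOF of the composition unit `digest_file.COMPOSITION`: the 7 segments of `digest_file` chain into its contract, by the theorem
   `Gif.Spec.digest_file.compose` (proved next to the cut assertions). -/
import Gif.Spec.Units.digest_file_COMPOSITION

/-- The segments of `digest_file` compose into its contract. -/
theorem Gif.Spec.Proved.digest_file_COMPOSITION_ok : Gif.Spec.digest_file_COMPOSITION.Statement := by
  intro Lay _hLay μ _hμ u₀ h_digest_file_1 h_digest_file_2 h_digest_file_3 h_digest_file_4 h_digest_file_5 h_digest_file_6 h_digest_file_7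
  apply Gif.Spec.digest_file.compose
  all_goals assumption
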